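-- pv_equiv track=rewrite | github.com/DanielKostura/MUNI | 1. vlna/Backtracking ++/backtracking++AR.py | backtrack
-- ===== SOURCE A (Python) =====
-- def is_valid(
--             x: int,
--             y: int,
--             arctic_map: list[list[str]]
--             ) -> bool:
--
--     return 0 <= x < len(arctic_map) and 0 <= y < len(arctic_map[0]) and arctic_map[x][y] != "X"
--
-- def backtrack(
--             x: int,
--             y: int,
--             path: list[str],
--             arctic_map: list[list[str]],
--             result: list[str]
--             ) -> bool:
--
--         arctic_map = [x.copy() for x in arctic_map]
--         if not is_valid(x, y, arctic_map):
--             return False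
--
--         if arctic_map[x][y] == "C":
--             result.append(path)
--             return True
--
--         temp: str = arctic_map[x][y]
--         arctic_map[x][y] = "X"
--
--         for dx, dy, direction in [(0, 1, "R"), (1, 0, "D"), (0, -1, "L"), (-1, 0, "U")]:
--             new_x, new_y = x + dx, y + dy
--             new_path = path + [direction]
--
--             if backtrack(new_x, new_y, new_path, arctic_map, result):
--                 return True
--
--         arctic_map[x][y] = temp
--         return False
-- ===== SOURCE B (Python) =====
-- def backtrack(
--             x: int,
--             y: int,
--             path: list[str],
--             arctic_map: list[list[str]],
--             result: list[str]
--             ) -> bool: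
--
--     # Depth-first search driven by an explicit LIFO worklist instead of recursion.
--     # Each expanded frame snapshots the grid with its own cell blocked, so a
--     # frame's alternatives never see marks made while exploring a sibling branch.
--     stack = [(x, y, path, arctic_map)]
--     while stack:
--         cx, cy, cpath, grid = stack.pop()
--         if not (0 <= cx < len(grid) and 0 <= cy < len(grid[0]) and grid[cx][cy] != "X"):
--             continue
--         if grid[cx][cy] == "C":
--             result.append(cpath)
--             return True
--         marked = [row[:] for row in grid]
--         marked[cx][cy] = "X"
--         for dx, dy, d in ((-1, 0, "U"), (0, -1, "L"), (1, 0, "D"), (0, 1, "R")):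
--             stack.append((cx + dx, cy + dy, cpath + [d], marked))
--     return False
-- ===== Notes on version B (the rewrite author's own statement) =====
-- stated objective: alternative
-- what changed: The branching recursion (which copies the whole grid on every call, including invalid and goal calls) is replaced by an iterative depth-first search over an explicit LIFO worklist of frames, copying the grid only once per expanded cell; Pre_ excludes ragged grids on which the search can probe a cell missing from a short row, where both A and B raise IndexError.
-- outside the precondition, e.g. on backtrack(0, 0, [], [['a', 'C'], ['z']], []): A returns True, B returns True; on backtrack(0, 1, [], [['a', 'b'], ['z'], ['C']], []): A raises IndexError, B raises IndexError
import Mathlib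
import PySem

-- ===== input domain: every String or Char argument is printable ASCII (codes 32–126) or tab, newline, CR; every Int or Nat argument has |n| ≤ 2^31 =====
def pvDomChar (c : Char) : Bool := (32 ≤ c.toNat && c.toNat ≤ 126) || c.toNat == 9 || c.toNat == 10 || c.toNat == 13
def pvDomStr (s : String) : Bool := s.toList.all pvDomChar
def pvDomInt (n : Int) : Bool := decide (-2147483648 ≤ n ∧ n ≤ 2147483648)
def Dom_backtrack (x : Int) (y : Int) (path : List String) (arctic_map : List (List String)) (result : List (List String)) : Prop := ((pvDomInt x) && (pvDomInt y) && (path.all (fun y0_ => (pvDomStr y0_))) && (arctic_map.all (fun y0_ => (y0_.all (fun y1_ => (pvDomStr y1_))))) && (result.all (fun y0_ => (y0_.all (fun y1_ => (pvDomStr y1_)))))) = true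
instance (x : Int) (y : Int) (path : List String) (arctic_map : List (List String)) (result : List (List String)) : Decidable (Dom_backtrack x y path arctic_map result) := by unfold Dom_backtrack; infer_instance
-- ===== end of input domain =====

-- B replaces A's branching recursion (which snapshots the whole grid on every call) by an
-- explicit LIFO worklist loop that snapshots the grid only once per expanded cell.
-- Both functions also append the found path to `result` (a side effect on the caller's list);
-- the equivalence proved here is about the RETURN value; the appended path is the same in A and B.

-- measure used only by the termination proofs of both ports: number of non-"X" cells
def pvFree (g : List (List String)) : Nat := (g.map (fun r => r.countP (fun s => s != "X"))).sum

theorem pvCountP_set_lt (r : List String) (j : Nat) (c : String)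
    (hj : r[j]? = some c) (hc : c ≠ "X") :
    (r.set j "X").countP (fun s => s != "X") < r.countP (fun s => s != "X") := by
  induction r generalizing j with
  | nil => simp at hj
  | cons a t ih =>
    cases j with
    | zero =>
      simp at hj
      subst hj
      simp [hc]
    | succ j =>
      simp at hj
      have := ih j hj
      simp [List.countP_cons]
      omega

theorem pvFree_mark_lt (x y : Int) (g : List (List String))
    (hx : 0 ≤ x) (hy : 0 ≤ y)
    (h : (((PySem.List.pyGet? g x).bind fun r => PySem.List.pyGet? r y).getD "X" != "X") = true) :
    pvFree (g.modify x.toNat (fun row => row.set y.toNat "X")) < pvFree g := by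
  rw [PySem.List.pyGet?_of_nonneg (xs := g) hx] at h
  cases hrow : g[x.toNat]? with
  | none => rw [hrow] at h; simp at h
  | some row =>
    rw [hrow] at h
    simp only [Option.bind_some] at h
    rw [PySem.List.pyGet?_of_nonneg (xs := row) hy] at h
    cases hc : row[y.toNat]? with
    | none => rw [hc] at h; simp at h
    | some c =>
      rw [hc] at h
      simp only [Option.getD_some, bne_iff_ne, ne_eq] at h
      -- induction over the outer list
      clear hx hy
      generalize x.toNat = i at hrow ⊢
      induction g generalizing i with
      | nil => simp at hrow
      | cons r t ih =>
        cases i with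
        | zero =>
          simp at hrow
          subst hrow
          simpa [pvFree, List.modify] using pvCountP_set_lt r y.toNat c hc h
        | succ i =>
          simp at hrow
          have := ih i hrow
          simpa [pvFree, List.modify] using this

-- ===== PORT A =====
def is_valid (x : Int) (y : Int) (arctic_map : List (List String)) : Bool :=
  decide (0 ≤ x) && decide (x < (arctic_map.length : Int)) &&
  decide (0 ≤ y) && decide (y < ((arctic_map.headD []).length : Int)) &&
  -- Python 'arctic_map[x][y] != "X"'; a missing cell (ragged row) is an IndexError in
  -- Python — the "X" default below only makes the port total there; Pre_ excludes it
  (((PySem.List.pyGet? arctic_map x).bind fun r => PySem.List.pyGet? r y).getD "X" != "X")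

def backtrack (x : Int) (y : Int) (path : List String) (arctic_map : List (List String)) (result : List (List String)) : Bool :=
  -- 'arctic_map = [x.copy() for x in arctic_map]' is a no-op under value semantics
  if hv : is_valid x y arctic_map then
    if ((PySem.List.pyGet? arctic_map x).bind fun r => PySem.List.pyGet? r y).getD "" == "C" then
      true  -- Python also does result.append(path) here (side effect; return value ported)
    else
      -- temp/mark/unmark: the unmark is invisible (the map was a per-call copy)
      let marked := arctic_map.modify x.toNat (fun row => row.set y.toNat "X")
      backtrack x (y + 1) (path ++ ["R"]) marked result ||
      backtrack (x + 1) y (path ++ ["D"]) marked result ||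
      backtrack x (y - 1) (path ++ ["L"]) marked result ||
      backtrack (x - 1) y (path ++ ["U"]) marked result
  else false
termination_by pvFree arctic_map
decreasing_by
  all_goals
    simp only [is_valid, Bool.and_eq_true, decide_eq_true_eq] at hv
    exact pvFree_mark_lt x y arctic_map hv.1.1.1.1 hv.1.1.2 hv.2

-- ===== PORT B =====
-- worklist loop of Source B: stack modelled head-first (head = top of stack)
def pvLoop (stack : List (Int × Int × List String × List (List String))) : Bool :=
  match stack with
  | [] => false
  | (cx, cy, cpath, grid) :: rest =>
    if hv : decide (0 ≤ cx) && decide (cx < (grid.length : Int)) &&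
        decide (0 ≤ cy) && decide (cy < ((grid.headD []).length : Int)) &&
        (((PySem.List.pyGet? grid cx).bind fun r => PySem.List.pyGet? r cy).getD "X" != "X") then
      if ((PySem.List.pyGet? grid cx).bind fun r => PySem.List.pyGet? r cy).getD "" == "C" then
        true  -- Python also does result.append(cpath) here (side effect; return value ported)
      else
        let marked := grid.modify cx.toNat (fun row => row.set cy.toNat "X")
        pvLoop ((cx, cy + 1, cpath ++ ["R"], marked) ::
                (cx + 1, cy, cpath ++ ["D"], marked) ::
                (cx, cy - 1, cpath ++ ["L"], marked) ::
                (cx - 1, cy, cpath ++ ["U"], marked) :: rest)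
    else
      pvLoop rest
termination_by (stack.map (fun f => 5 ^ pvFree f.2.2.2)).sum
decreasing_by
  · simp only [Bool.and_eq_true, decide_eq_true_eq] at hv
    have hm := pvFree_mark_lt cx cy grid hv.1.1.1.1 hv.1.1.2 hv.2
    simp only [List.map_cons, List.sum_cons]
    have h5 : 5 ^ (pvFree (grid.modify cx.toNat (fun row => row.set cy.toNat "X")) + 1) ≤ 5 ^ pvFree grid :=
      Nat.pow_le_pow_right (by norm_num) (by omega)
    rw [pow_succ] at h5
    have hp : 0 < 5 ^ pvFree (grid.modify cx.toNat (fun row => row.set cy.toNat "X")) :=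
      Nat.pow_pos (by norm_num)
    omega
  · simp only [List.map_cons, List.sum_cons]
    have : 0 < 5 ^ pvFree grid := Nat.pow_pos (by norm_num)
    omega

def backtrack_alt (x : Int) (y : Int) (path : List String) (arctic_map : List (List String)) (result : List (List String)) : Bool :=
  pvLoop [(x, y, path, arctic_map)]

-- ===== PRECONDITION & SPEC =====
-- Pre_ excludes inputs on which Python A raises IndexError on a ragged grid (a probed row
-- shorter than the first row); it keeps all grids whose rows are at least as long as the
-- first row, and ragged grids whose start cell terminates the search immediately.
def Pre_backtrack (x : Int) (y : Int) (path : List String) (arctic_map : List (List String)) (result : List (List String)) : Prop :=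
  (∀ row ∈ arctic_map, (arctic_map.headD []).length ≤ row.length) ∨
  ¬ (0 ≤ x ∧ x < (arctic_map.length : Int)) ∨
  ¬ (0 ≤ y ∧ y < ((arctic_map.headD []).length : Int)) ∨
  ((PySem.List.pyGet? arctic_map x).bind fun r => PySem.List.pyGet? r y) = some "X" ∨
  ((PySem.List.pyGet? arctic_map x).bind fun r => PySem.List.pyGet? r y) = some "C"
instance (x : Int) (y : Int) (path : List String) (arctic_map : List (List String)) (result : List (List String)) : Decidable (Pre_backtrack x y path arctic_map result) := by unfold Pre_backtrack; infer_instance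

def pvWitness_backtrack : Int × Int × List String × List (List String) × List (List String) :=
  (0, 0, [], [["a", "C"]], [])

def Spec_backtrack (x : Int) (y : Int) (path : List String) (arctic_map : List (List String)) (result : List (List String)) (out : Bool) : Prop := out = backtrack_alt x y path arctic_map result
instance (x : Int) (y : Int) (path : List String) (arctic_map : List (List String)) (result : List (List String)) (out : Bool) : Decidable (Spec_backtrack x y path arctic_map result out) := by unfold Spec_backtrack; infer_instance

-- ===== CLAIM (what is proved, stated in full; the proofs are below) =====
def Claim_equal_backtrack : Prop := ∀ (x : Int) (y : Int) (path : List String) (arctic_map : List (List String)) (result : List (List String)), Dom_backtrack x y path arctic_map result → Pre_backtrack x y path arctic_map result → Spec_backtrack x y path arctic_map result (backtrack x y path arctic_map result)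

-- ===== LEMMAS AND PROOFS =====

-- the worklist processes its top frame exactly as A's recursion does, then falls through
theorem pvLoop_cons (n : Nat) : ∀ (g : List (List String)), pvFree g < n →
    ∀ (x y : Int) (p : List String) (res : List (List String)) (rest : List (Int × Int × List String × List (List String))),
    pvLoop ((x, y, p, g) :: rest) = (backtrack x y p g res || pvLoop rest) := by
  induction n with
  | zero => intro g hg; omega
  | succ n ih =>
    intro g hg x y p res rest
    rw [pvLoop, backtrack]
    by_cases hv : (decide (0 ≤ x) && decide (x < (g.length : Int)) &&
        decide (0 ≤ y) && decide (y < ((g.headD []).length : Int)) &&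
        (((PySem.List.pyGet? g x).bind fun r => PySem.List.pyGet? r y).getD "X" != "X")) = true
    · have hv' : is_valid x y g = true := hv
      rw [dif_pos hv, dif_pos hv']
      by_cases hC : (((PySem.List.pyGet? g x).bind fun r => PySem.List.pyGet? r y).getD "" == "C") = true
      · rw [if_pos hC, if_pos hC, Bool.true_or]
      · rw [if_neg hC, if_neg hC]
        simp only [Bool.and_eq_true, decide_eq_true_eq] at hv
        have hm := pvFree_mark_lt x y g hv.1.1.1.1 hv.1.1.2 hv.2
        have hn : pvFree (g.modify x.toNat (fun row => row.set y.toNat "X")) < n := by omega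
        rw [ih _ hn x (y + 1) (p ++ ["R"]) res,
            ih _ hn (x + 1) y (p ++ ["D"]) res,
            ih _ hn x (y - 1) (p ++ ["L"]) res,
            ih _ hn (x - 1) y (p ++ ["U"]) res]
        simp [Bool.or_assoc]
    · have hv' : ¬ is_valid x y g = true := hv
      rw [dif_neg hv, dif_neg hv', Bool.false_or]

-- ===== VERDICT (by name: the statement is the Claim_ definition above) =====
theorem backtrack_spec : Claim_equal_backtrack := by
  intro x y path arctic_map result _ _
  unfold Spec_backtrack backtrack_alt
  rw [pvLoop_cons (pvFree arctic_map + 1) arctic_map (by omega) x y path result []]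
  rw [pvLoop, Bool.or_false]
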